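-- pv_equiv track=rewrite | github.com/MrWrynn/TutorialPython | cosas.py | TriangularSuperiorAux
-- ===== SOURCE A (Python) =====
-- def TriangularSuperiorAux(matriz,j):
--     if len(matriz) == 1:
--         return 0
--     else:
--          if matriz[1][:j].count(0)!=j:
--             del matriz[1]
--             return 1+TriangularSuperiorAux(matriz,j+1)
--          else:
--             del matriz[1]
--             return TriangularSuperiorAux(matriz,j+1)
-- ===== SOURCE B (Python) =====
-- def TriangularSuperiorAux(matriz, j):
--     count = sum(1 for i, fila in enumerate(matriz[1:]) if fila[:j + i].count(0) != j + i)
--     del matriz[1:]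
--     return count
-- ===== Notes on version B (the rewrite author's own statement) =====
-- stated objective: simpler
-- what changed: Replaces the tail recursion that repeatedly deletes matriz[1] with a single comprehension over enumerate(matriz[1:]) testing each row's prefix of length j+i, followed by one del matriz[1:] that reproduces the final list state.
import Mathlib
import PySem

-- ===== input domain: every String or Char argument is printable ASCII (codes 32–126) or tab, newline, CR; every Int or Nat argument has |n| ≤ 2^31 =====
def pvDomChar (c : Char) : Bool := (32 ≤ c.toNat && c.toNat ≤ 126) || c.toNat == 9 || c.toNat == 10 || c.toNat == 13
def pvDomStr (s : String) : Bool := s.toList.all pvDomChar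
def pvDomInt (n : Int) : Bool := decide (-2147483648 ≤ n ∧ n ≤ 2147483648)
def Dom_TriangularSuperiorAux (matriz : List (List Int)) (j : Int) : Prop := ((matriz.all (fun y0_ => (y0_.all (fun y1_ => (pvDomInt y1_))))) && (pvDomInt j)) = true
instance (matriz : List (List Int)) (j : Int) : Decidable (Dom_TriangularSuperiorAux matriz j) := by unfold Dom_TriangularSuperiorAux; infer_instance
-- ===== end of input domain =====

-- B replaces A's delete-and-recurse with one comprehension over enumerate(matriz[1:]); equivalence is about the return value (both leave matriz as [matriz[0]]).


-- ===== PORT A =====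
-- literal transliteration of A's recursion; the [] case is unreachable under Pre_ (Python raises IndexError there)
def TriangularSuperiorAux : List (List Int) → Int → Int
  | [], _ => 0
  | [_], _ => 0
  | a :: b :: rest, j =>
      if PySem.List.count (PySem.List.slice b none (some j)) 0 ≠ j then
        1 + TriangularSuperiorAux (a :: rest) (j + 1)
      else
        TriangularSuperiorAux (a :: rest) (j + 1)

-- ===== PORT B =====
-- sum(1 for i, fila in enumerate(matriz[1:]) if fila[:j+i].count(0) != j+i)
def TriangularSuperiorAux_alt (matriz : List (List Int)) (j : Int) : Int :=
  ((PySem.List.enumerate (PySem.List.slice matriz (some 1) none) 0).map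
    (fun p => if PySem.List.count (PySem.List.slice p.2 none (some (j + p.1))) 0 ≠ j + p.1 then (1 : Int) else 0)).sum

-- ===== PRECONDITION & SPEC =====
-- Pre_ excludes only the empty matrix, on which Python A raises IndexError (matriz[1]).
def Pre_TriangularSuperiorAux (matriz : List (List Int)) (j : Int) : Prop := matriz ≠ []
instance (matriz : List (List Int)) (j : Int) : Decidable (Pre_TriangularSuperiorAux matriz j) := by unfold Pre_TriangularSuperiorAux; infer_instance

def pvWitness_TriangularSuperiorAux : List (List Int) × Int := ([[1, 0], [0, 3], [0, 0]], 1)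

def Spec_TriangularSuperiorAux (matriz : List (List Int)) (j : Int) (out : Int) : Prop := out = TriangularSuperiorAux_alt matriz j
instance (matriz : List (List Int)) (j : Int) (out : Int) : Decidable (Spec_TriangularSuperiorAux matriz j out) := by unfold Spec_TriangularSuperiorAux; infer_instance

-- ===== CLAIM (what is proved, stated in full; the proofs are below) =====
def Claim_equal_TriangularSuperiorAux : Prop := ∀ (matriz : List (List Int)) (j : Int), Dom_TriangularSuperiorAux matriz j → Pre_TriangularSuperiorAux matriz j → Spec_TriangularSuperiorAux matriz j (TriangularSuperiorAux matriz j)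

-- ===== LEMMAS AND PROOFS =====

-- shifting the start of enumerate shifts the index fed to the summand
lemma enum_shift (F : Int → List Int → Int) :
    ∀ (rest : List (List Int)) (s j : Int),
      ((PySem.List.enumerate rest s).map (fun p => F (j + p.1) p.2)).sum =
      ((PySem.List.enumerate rest 0).map (fun p => F ((j + s) + p.1) p.2)).sum := by
  intro rest
  induction rest with
  | nil => intro s j; simp [PySem.List.enumerate_nil]
  | cons x xs ih =>
      intro s j
      simp only [PySem.List.enumerate_cons, List.map_cons, List.sum_cons, zero_add, add_zero]
      rw [ih (s + 1) j, ih 1 (j + s)]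
      have h : j + (s + 1) = j + s + 1 := by ring
      rw [h]

-- A's recursion computes B's enumerate sum over the rows after the head
lemma key : ∀ (rest : List (List Int)) (a : List Int) (j : Int),
    TriangularSuperiorAux (a :: rest) j =
    ((PySem.List.enumerate rest 0).map
      (fun p => if PySem.List.count (PySem.List.slice p.2 none (some (j + p.1))) 0 ≠ j + p.1 then (1 : Int) else 0)).sum := by
  intro rest
  induction rest with
  | nil => intro a j; simp [TriangularSuperiorAux, PySem.List.enumerate_nil]
  | cons b rest ih =>
      intro a j
      have hshift := enum_shift (fun k row => if (PySem.List.count (PySem.List.slice row none (some k)) 0 : Int) ≠ k then (1 : Int) else 0) rest 1 j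
      simp only [PySem.List.enumerate_cons, List.map_cons, List.sum_cons,
        TriangularSuperiorAux, zero_add, add_zero]
      rw [ih a (j + 1)]
      simp only [hshift]
      split_ifs <;> ring

-- ===== VERDICT (by name: the statement is the Claim_ definition above) =====
theorem TriangularSuperiorAux_spec : Claim_equal_TriangularSuperiorAux := by
  intro matriz j _ hpre
  unfold Spec_TriangularSuperiorAux TriangularSuperiorAux_alt
  cases matriz with
  | nil => exact absurd rfl hpre
  | cons a rest =>
      rw [PySem.List.slice_from_one]
      exact key rest a j
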